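-- pv_equiv track=rewrite | github.com/hhoeflin/mkreports | mkreports/md/text.py | count_newlines
-- ===== SOURCE A (Python) =====
-- def count_newlines(x: str, before=True) -> int:
--     """
--     Count the number of newlines from front or back.
--
--     Here all newlines are counted while ignoring whitespace.
--     Stop at first character that is not newline or whitespace.
--     If there are no non-newline or whitespace characters, return
--     infinite number of newlines.
--     """
--     num_nl = 0
--     whitespace = [" ", "\r", "\t"]
--     y = x if before else reversed(x)
--     for ch in y:
--         if ch == "\n":
--             num_nl += 1
--         elif ch in whitespace:
--             continue
--         else:
--             return num_nl
--     return num_nl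
-- ===== SOURCE B (Python) =====
-- _WS = " \r\t\n"
--
--
-- def count_newlines(x: str, before=True) -> int:
--     # Find the whitespace boundary with lstrip/rstrip, then count the
--     # newlines in the stripped-off region.
--     if before:
--         region = x[: len(x) - len(x.lstrip(_WS))]
--     else:
--         region = x[len(x.rstrip(_WS)):]
--     return region.count("\n")
-- ===== Notes on version B (the rewrite author's own statement) =====
-- stated objective: idiomatic
-- what changed: Replaces the explicit early-returning per-character scan by lstrip/rstrip with the explicit whitespace character set (space, CR, tab, newline) to locate the whitespace boundary, then counts newlines in the removed slice with str.count.
import Mathlib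
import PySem

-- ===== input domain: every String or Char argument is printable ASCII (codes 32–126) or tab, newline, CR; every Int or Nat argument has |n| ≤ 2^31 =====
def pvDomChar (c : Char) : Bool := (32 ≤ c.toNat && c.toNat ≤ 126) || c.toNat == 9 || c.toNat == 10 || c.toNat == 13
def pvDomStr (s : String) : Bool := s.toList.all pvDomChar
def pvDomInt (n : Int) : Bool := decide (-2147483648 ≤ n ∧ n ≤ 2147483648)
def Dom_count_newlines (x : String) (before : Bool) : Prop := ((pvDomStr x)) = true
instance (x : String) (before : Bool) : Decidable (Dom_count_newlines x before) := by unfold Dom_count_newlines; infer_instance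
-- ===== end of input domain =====

-- B replaces A's early-returning per-character scan by lstrip/rstrip with the char set " \r\t\n"
-- followed by str.count("\n") on the removed slice (idiomatic; same cost).

-- ===== PORT A =====
-- the for-loop with its early `return num_nl`
def pvLoopA : List Char → Int → Int
  | [], num_nl => num_nl
  | ch :: rest, num_nl =>
    if ch = '\n' then pvLoopA rest (num_nl + 1)
    else if ch = ' ' ∨ ch = '\r' ∨ ch = '\t' then pvLoopA rest num_nl
    else num_nl

def count_newlines (x : String) (before : Bool) : Int :=
  pvLoopA (if before then x.toList else x.toList.reverse) 0

-- ===== PORT B =====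
def pvWS : List Char := [' ', '\r', '\t', '\n']

-- hand ports of str.lstrip(chars) / str.rstrip(chars): drop leading / trailing
-- characters that are in the set (exact for any char set)
def pvLStrip (cs : List Char) : List Char := cs.dropWhile (fun c => pvWS.contains c)
def pvRStrip (cs : List Char) : List Char := (cs.reverse.dropWhile (fun c => pvWS.contains c)).reverse

def count_newlines_alt (x : String) (before : Bool) : Int :=
  (PySem.Chars.count
    (if before then
      PySem.List.slice x.toList none
        (some ((x.toList.length : Int) - ((pvLStrip x.toList).length : Int)))
    else
      PySem.List.slice x.toList (some ((pvRStrip x.toList).length : Int)) none)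
    ['\n'] : Int)

-- ===== PRECONDITION & SPEC =====
def Spec_count_newlines (x : String) (before : Bool) (out : Int) : Prop := out = count_newlines_alt x before
instance (x : String) (before : Bool) (out : Int) : Decidable (Spec_count_newlines x before out) := by unfold Spec_count_newlines; infer_instance

-- ===== CLAIM (what is proved, stated in full; the proofs are below) =====
def Claim_equal_count_newlines : Prop := ∀ (x : String) (before : Bool), Dom_count_newlines x before → Spec_count_newlines x before (count_newlines x before)

-- ===== LEMMAS AND PROOFS =====

-- A's loop returns the starting value plus the number of '\n' in the maximal whitespace prefix
theorem pvLoopA_eq (cs : List Char) (n : Int) :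
    pvLoopA cs n = n + ((cs.takeWhile (fun c => pvWS.contains c)).count '\n' : Int) := by
  induction cs generalizing n with
  | nil => simp [pvLoopA]
  | cons c rest ih =>
    simp only [pvLoopA, List.takeWhile_cons]
    by_cases h : c = '\n'
    · subst h
      rw [if_pos rfl, if_pos (show pvWS.contains '\n' = true by decide), ih,
        List.count_cons_self]
      push_cast; ring
    · rw [if_neg h]
      by_cases hw : c = ' ' ∨ c = '\r' ∨ c = '\t'
      · have hc : pvWS.contains c = true := by
          rcases hw with h1 | h1 | h1 <;> subst h1 <;> decide
        rw [if_pos hw, if_pos hc, ih]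
        simp [List.count_cons, h]
      · have hc : ¬ pvWS.contains c = true := by
          intro ht
          have hm : c = ' ' ∨ c = '\r' ∨ c = '\t' ∨ c = '\n' := by
            simpa [pvWS, List.contains_eq_mem] using ht
          tauto
        rw [if_neg hw, if_neg hc]
        simp

-- counting a single-character pattern with Python's str.count is List.count
theorem pvCountGo_single (fuel : Nat) (l : List Char) (acc : Nat) (h : l.length ≤ fuel) :
    PySem.Chars.count.go ['\n'] fuel l acc = acc + l.count '\n' := by
  induction fuel generalizing l acc with
  | zero =>
    have : l = [] := List.eq_nil_of_length_eq_zero (Nat.le_zero.mp h)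
    subst this; simp [PySem.Chars.count.go]
  | succ fuel ih =>
    cases l with
    | nil => simp [PySem.Chars.count.go]
    | cons c rest =>
      simp only [PySem.Chars.count.go]
      by_cases hc : c = '\n'
      · subst hc
        have hp : List.isPrefixOf ['\n'] ('\n' :: rest) = true := by
          simp [List.isPrefixOf]
        simp only [hp, if_pos rfl]
        rw [show List.drop (List.length ['\n']) ('\n' :: rest) = rest from rfl]
        rw [ih rest (acc + 1) (by simpa using Nat.le_of_succ_le_succ (by simpa using h))]
        simp [List.count_cons]
        omega
      · have hp : List.isPrefixOf ['\n'] (c :: rest) = false := by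
          simp [List.isPrefixOf]
          exact fun hh => hc hh.symm
        simp only [hp]
        rw [if_neg (by simp)]
        rw [ih rest acc (by simpa using Nat.le_of_succ_le_succ (by simpa using h))]
        simp [List.count_cons, hc]

theorem pvCount_single (l : List Char) :
    PySem.Chars.count l ['\n'] = l.count '\n' := by
  have h := pvCountGo_single l.length l 0 (le_refl _)
  simpa [PySem.Chars.count] using h

-- the slice taken in the `before` branch IS the maximal whitespace prefix
theorem pvRegion_before (cs : List Char) :
    PySem.List.slice cs none (some ((cs.length : Int) - ((pvLStrip cs).length : Int)))
      = cs.takeWhile (fun c => pvWS.contains c) := by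
  have hL : (pvLStrip cs).length ≤ cs.length := by
    simpa [pvLStrip] using List.length_dropWhile_le (p := fun c => pvWS.contains c) (l := cs)
  have hb : (0 : Int) ≤ (cs.length : Int) - ((pvLStrip cs).length : Int) := by
    omega
  rw [PySem.List.slice_to _ hb]
  have ht : ((cs.length : Int) - ((pvLStrip cs).length : Int)).toNat
      = cs.length - (pvLStrip cs).length := by omega
  rw [ht]
  have hsplit := List.takeWhile_append_dropWhile (p := fun c => pvWS.contains c) (l := cs)
  have hlen : cs.length - (pvLStrip cs).length
      = (cs.takeWhile (fun c => pvWS.contains c)).length := by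
    have h2 := congrArg List.length hsplit
    simp only [List.length_append] at h2
    simp only [pvLStrip]
    omega
  rw [hlen]
  nth_rewrite 2 [← hsplit]
  exact List.take_left

-- the slice taken in the `after` branch is the reversed maximal whitespace prefix of the reverse
theorem pvRegion_after (cs : List Char) :
    PySem.List.slice cs (some (((pvRStrip cs).length : Nat) : Int)) none
      = (cs.reverse.takeWhile (fun c => pvWS.contains c)).reverse := by
  rw [PySem.List.slice_from _ (by positivity)]
  have ht : ((((pvRStrip cs).length : Nat) : Int)).toNat = (pvRStrip cs).length := by omega
  rw [ht]
  have hcs : cs = (cs.reverse.dropWhile (fun c => pvWS.contains c)).reverse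
      ++ (cs.reverse.takeWhile (fun c => pvWS.contains c)).reverse := by
    conv_lhs => rw [← List.reverse_reverse cs,
      ← List.takeWhile_append_dropWhile (p := fun c => pvWS.contains c) (l := cs.reverse)]
    rw [List.reverse_append]
  have hlen : (pvRStrip cs).length
      = ((cs.reverse.dropWhile (fun c => pvWS.contains c)).reverse).length := by
    simp [pvRStrip]
  rw [hlen]
  nth_rewrite 2 [hcs]
  exact List.drop_left

-- ===== VERDICT (by name: the statement is the Claim_ definition above) =====
theorem count_newlines_spec : Claim_equal_count_newlines := by
  intro x before _
  unfold Spec_count_newlines count_newlines count_newlines_alt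
  cases before with
  | true =>
    rw [if_pos rfl, if_pos rfl, pvLoopA_eq, pvRegion_before, pvCount_single]
    push_cast; ring
  | false =>
    rw [if_neg (by simp), if_neg (by simp), pvLoopA_eq, pvRegion_after, pvCount_single,
      List.count_reverse]
    push_cast; ring
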